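-- pv_equiv track=rewrite | github.com/ChangxingJiang/OJ-Practice | 1701-1800/1725/1725_Python_1.py | countGoodRectangles
-- ===== SOURCE A (Python) =====
-- from typing import List
--
-- def countGoodRectangles(rectangles: List[List[int]]) -> int:
--     max_val, max_num = 0, 0
--     for l, w in rectangles:
--         if l < w:
--             l, w = w, l
--         if w > max_val:
--             max_val, max_num = w, 1
--         elif w == max_val:
--             max_num += 1
--     return max_num
-- ===== SOURCE B (Python) =====
-- def countGoodRectangles(rectangles):
--     sides = [min(l, w) for l, w in rectangles]
--     m = max([0] + sides)
--     return sides.count(m)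
-- ===== Notes on version B (the rewrite author's own statement) =====
-- stated objective: simpler
-- what changed: Replaced A's single running-max-and-counter loop over unpacked pairs by three plain passes: build the list of min sides, take its max (with 0 as A's initial default), and count occurrences of that max.
import Mathlib
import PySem

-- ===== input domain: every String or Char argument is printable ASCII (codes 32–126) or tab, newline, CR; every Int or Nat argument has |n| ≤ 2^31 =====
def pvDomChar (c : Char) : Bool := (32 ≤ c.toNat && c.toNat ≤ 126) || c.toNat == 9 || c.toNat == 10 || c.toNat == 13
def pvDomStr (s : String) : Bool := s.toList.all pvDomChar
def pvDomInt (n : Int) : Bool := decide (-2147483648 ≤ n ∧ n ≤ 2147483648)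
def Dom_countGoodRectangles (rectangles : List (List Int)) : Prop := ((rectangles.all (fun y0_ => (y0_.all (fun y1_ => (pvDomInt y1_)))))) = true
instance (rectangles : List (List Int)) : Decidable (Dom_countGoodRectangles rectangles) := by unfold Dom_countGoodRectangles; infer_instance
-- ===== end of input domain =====

-- B replaces A's running-max-and-counter loop by three plain passes (min sides, max with default 0, count).
-- Pre_ excludes rows that are not exactly [l, w]: Python's 'for l, w in rectangles' raises ValueError there.

-- ===== PORT A =====
-- the loop body: unpack [l, w], swap so w = min, then update (max_val, max_num)
def pvStepA (st : Int × Int) (row : List Int) : Int × Int :=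
  match row with
  | [l, w] =>
    let (_, w) := if l < w then (w, l) else (l, w)
    if w > st.1 then (w, 1)
    else if w = st.1 then (st.1, st.2 + 1)
    else st
  | _ => st  -- unreachable under Pre_ (Python raises ValueError on unpacking)

def countGoodRectangles (rectangles : List (List Int)) : Int :=
  (rectangles.foldl pvStepA (0, 0)).2

-- ===== PORT B =====
def pvSide (r : List Int) : Int :=
  match r with
  | [l, w] => min l w
  | _ => 0  -- unreachable under Pre_ (Python raises ValueError on unpacking)

def countGoodRectangles_alt (rectangles : List (List Int)) : Int :=
  let sides := rectangles.map pvSide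
  let m := sides.foldl max 0   -- max([0] + sides)
  ((sides.count m : Nat) : Int)

-- ===== PRECONDITION & SPEC =====
def Pre_countGoodRectangles (rectangles : List (List Int)) : Prop :=
  ∀ r ∈ rectangles, r.length = 2
instance (rectangles : List (List Int)) : Decidable (Pre_countGoodRectangles rectangles) := by unfold Pre_countGoodRectangles; infer_instance

def pvWitness_countGoodRectangles : List (List Int) := [[3, 4], [2, 2], [0, -1]]

def Spec_countGoodRectangles (rectangles : List (List Int)) (out : Int) : Prop := out = countGoodRectangles_alt rectangles
instance (rectangles : List (List Int)) (out : Int) : Decidable (Spec_countGoodRectangles rectangles out) := by unfold Spec_countGoodRectangles; infer_instance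

-- ===== CLAIM (what is proved, stated in full; the proofs are below) =====
def Claim_equal_countGoodRectangles : Prop := ∀ (rectangles : List (List Int)), Dom_countGoodRectangles rectangles → Pre_countGoodRectangles rectangles → Spec_countGoodRectangles rectangles (countGoodRectangles rectangles)

-- ===== LEMMAS AND PROOFS =====

-- the side A's swap computes is min l w
lemma pvStepA_pair (st : Int × Int) (l w : Int) :
    pvStepA st [l, w] =
      if min l w > st.1 then (min l w, 1)
      else if min l w = st.1 then (st.1, st.2 + 1) else st := by
  simp only [pvStepA]
  by_cases h : l < w
  · have hm : min l w = l := by omega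
    simp [h, hm]
  · have hm : min l w = w := by omega
    simp [h, hm]

-- invariant of A's loop: starting from (mv, mn), it returns the count of the new max,
-- plus mn when that max is still mv
lemma pvLoopA_eq (rows : List (List Int)) (mv mn : Int)
    (h : ∀ r ∈ rows, r.length = 2) :
    (rows.foldl pvStepA (mv, mn)).2 =
      (let sides := rows.map pvSide
       let m := sides.foldl max mv
       if m = mv then mn + (sides.count m : Nat) else ((sides.count m : Nat) : Int)) := by
  induction rows generalizing mv mn with
  | nil => simp
  | cons r rest ih =>
    obtain ⟨l, w, rfl⟩ : ∃ l w, r = [l, w] := by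
      have h2 := h r (by simp)
      match r, h2 with
      | [l, w], _ => exact ⟨l, w, rfl⟩
    have hrest : ∀ r' ∈ rest, r'.length = 2 := fun r' hr' => h r' (by simp [hr'])
    have hmv : ∀ a : Int, a ≤ (rest.map pvSide).foldl max a := fun a =>
      (PySem.List.le_foldl_max (rest.map pvSide) a).1
    simp only [List.foldl_cons, List.map_cons, pvStepA_pair]
    have hside : pvSide [l, w] = min l w := by simp [pvSide]
    rw [hside]
    generalize min l w = s
    by_cases h1 : s > mv
    · rw [if_pos h1, ih _ _ hrest]
      have hmax : max mv s = s := by omega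
      simp only [hmax]
      have hge := hmv s
      by_cases h2 : (rest.map pvSide).foldl max s = s
      · rw [if_pos h2, if_neg (by omega)]
        simp [h2]
        omega
      · rw [if_neg h2, if_neg (by omega)]
        have hslt : s < (rest.map pvSide).foldl max s := lt_of_le_of_ne hge (fun e => h2 e.symm)
        simp [List.count_cons]
        omega
    · rw [if_neg h1]
      have hmax : max mv s = mv := by omega
      by_cases h2 : s = mv
      · rw [if_pos h2, ih _ _ hrest]
        simp only [hmax]
        have hge := hmv mv
        by_cases h3 : (rest.map pvSide).foldl max mv = mv
        · rw [if_pos h3, if_pos h3]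
          simp [h2, h3]
          omega
        · rw [if_neg h3, if_neg h3]
          have hlt : mv < (rest.map pvSide).foldl max mv := lt_of_le_of_ne hge (fun e => h3 e.symm)
          simp [List.count_cons]
          intro e
          omega
      · rw [if_neg h2, ih _ _ hrest]
        simp only [hmax]
        have hge := hmv mv
        by_cases h3 : (rest.map pvSide).foldl max mv = mv
        · rw [if_pos h3, if_pos h3]
          simp [List.count_cons, h3]
          intro e; exact absurd e h2
        · rw [if_neg h3, if_neg h3]
          have hlt : mv < (rest.map pvSide).foldl max mv := lt_of_le_of_ne hge (fun e => h3 e.symm)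
          simp [List.count_cons]
          intro e; omega

-- ===== VERDICT (by name: the statement is the Claim_ definition above) =====
theorem countGoodRectangles_spec : Claim_equal_countGoodRectangles := by
  intro rectangles _ hpre
  unfold Spec_countGoodRectangles countGoodRectangles countGoodRectangles_alt
  rw [pvLoopA_eq rectangles 0 0 hpre]
  simp only []
  by_cases h : (rectangles.map pvSide).foldl max 0 = 0 <;> simp [h]
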